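-- pv_equiv track=rewrite | github.com/SebastianGranath/adventofcode | Day 3/day3_2.py | ControlElement
-- ===== SOURCE A (Python) =====
-- def ControlElement(data,start_c,end_c,start_l,end_l):
--     truth_array = []
--     gear_candidate_star_pos = []
--     for count_l, el in enumerate(data[start_l:end_l]):
--         for count_c, ec in enumerate(el[start_c:end_c]):
--             if not ec.isnumeric() and ec !='.' and ec != '\n':
--                 if ec == '*':
--                     # ec is the element in the row el. Function goes through the line and each char in each line.
--                     gear_candidate_star_pos.append([start_c+count_c, start_l+count_l])
--
--                     #gear_candidate_star_pos.append([ec, el]) # Appending coordinate of star for gear_candidate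
--                 truth_array.append('1')
--
--     return any(truth_array), gear_candidate_star_pos
-- ===== SOURCE B (Python) =====
-- def ControlElement(data, start_c, end_c, start_l, end_l):
--     # Stage 1: slice out the subgrid rows once.
--     segs = [row[start_c:end_c] for row in data[start_l:end_l]]
--     # Stage 2: the boolean by character-class COUNTING (str.count), no per-char scan:
--     # a special char exists iff the allowed classes do not account for every char.
--     special = any(len(s) != sum(s.count(d) for d in "0123456789.\n") for s in segs)
--     # Stage 3: star positions by index-jumping with str.find instead of enumerating chars.
--     stars = []
--     for l, seg in enumerate(segs):
--         i = seg.find('*')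
--         while i != -1:
--             stars.append([start_c + i, start_l + l])
--             i = seg.find('*', i + 1)
--     return special, stars
-- ===== Notes on version B (the rewrite author's own statement) =====
-- stated objective: alternative
-- what changed: Replaces A's fused per-character scan (flag list + star accumulator in one nested loop) with staged string-method passes: the boolean comes from character-class counting via str.count over the allowed classes, and star positions come from index-jump searching with repeated str.find instead of enumerating characters.
import Mathlib
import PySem

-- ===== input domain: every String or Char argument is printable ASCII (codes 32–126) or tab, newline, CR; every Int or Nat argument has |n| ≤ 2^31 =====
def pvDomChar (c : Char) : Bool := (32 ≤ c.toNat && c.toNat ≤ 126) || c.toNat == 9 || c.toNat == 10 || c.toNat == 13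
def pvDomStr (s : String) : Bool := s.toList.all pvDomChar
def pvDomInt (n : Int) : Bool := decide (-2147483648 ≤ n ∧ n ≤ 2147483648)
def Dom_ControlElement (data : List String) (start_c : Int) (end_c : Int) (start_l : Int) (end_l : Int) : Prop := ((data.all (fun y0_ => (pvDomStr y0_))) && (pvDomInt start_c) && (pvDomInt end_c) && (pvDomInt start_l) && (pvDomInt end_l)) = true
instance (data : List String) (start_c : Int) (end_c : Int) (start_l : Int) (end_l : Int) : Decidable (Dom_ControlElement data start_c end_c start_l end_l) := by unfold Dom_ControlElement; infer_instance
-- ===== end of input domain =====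

-- B replaces A's fused per-character scan (a list of '1' flags plus a star accumulator
-- in one nested loop) with staged string-method passes: character-class COUNTING
-- (str.count over the allowed classes) for the boolean, and index-jump searching with
-- repeated str.find for the star positions (objective: alternative).

-- ===== PORT A =====
-- ec.isnumeric() on a single ASCII char is exactly '0'..'9' (PySem.Chars.isdigit)
def ControlElement (data : List String) (start_c : Int) (end_c : Int) (start_l : Int) (end_l : Int) : Bool × List (List Int) :=
  let st :=
    (PySem.List.enumerate (PySem.List.slice data (some start_l) (some end_l)) 0).foldl
      (fun (acc : List String × List (List Int)) p =>
        (PySem.List.enumerate (PySem.List.slice p.2.toList (some start_c) (some end_c)) 0).foldl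
          (fun (acc2 : List String × List (List Int)) q =>
            if !(PySem.Chars.isdigit q.2) && q.2 ≠ '.' && q.2 ≠ '\n' then
              ((acc2.1 ++ ["1"]),
               (if q.2 = '*' then acc2.2 ++ [[start_c + q.1, start_l + p.1]] else acc2.2))
            else acc2)
          acc)
      ([], [])
  (st.1.any (fun s => s ≠ ""), st.2)

-- ===== PORT B =====
-- the character classes Python B counts: "0123456789.\n"
def pvAllowed : List Char := "0123456789.\n".toList

-- termination facts for the str.find jump loop, cited by pvStarsFrom's decreasing_by:
-- find from a start past the end fails, and a successful find lands in [k, length)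
theorem pvFind_none_of_big (cs sub : List Char) (k : Nat) (h : cs.length < k) :
    PySem.Chars.findFrom cs sub (k : Int) none = -1 := by
  simp only [PySem.Chars.findFrom]
  rw [if_pos]
  omega

theorem pvFind_bounds (cs : List Char) (k : Nat)
    (h : PySem.Chars.findFrom cs ['*'] (k : Int) none ≠ -1) :
    k ≤ (PySem.Chars.findFrom cs ['*'] (k : Int) none).toNat ∧
    (PySem.Chars.findFrom cs ['*'] (k : Int) none).toNat < cs.length := by
  by_cases hk : k ≤ cs.length
  · obtain ⟨h1, h2, -⟩ := PySem.Chars.findFrom_natCast_spec cs ['*'] k hk h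
    have hne : List.drop (PySem.Chars.findFrom cs ['*'] (k : Int) none).toNat cs ≠ [] := by
      intro hnil
      rw [hnil] at h2
      exact (List.cons_ne_nil _ _) (List.prefix_nil.mp h2)
    rw [ne_eq, List.drop_eq_nil_iff, not_le] at hne
    exact ⟨by omega, hne⟩
  · exact absurd (pvFind_none_of_big cs ['*'] k (by omega)) h

-- the Python while-loop 'i = seg.find("*"); while i != -1: append; i = seg.find("*", i+1)'
def pvStarsFrom (cs : List Char) (k : Nat) : List Int :=
  let j := PySem.Chars.findFrom cs ['*'] (k : Int) none
  if h : j = -1 then [] else j :: pvStarsFrom cs (j.toNat + 1)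
termination_by cs.length + 1 - k
decreasing_by
  have := pvFind_bounds cs k h
  omega

def ControlElement_alt (data : List String) (start_c : Int) (end_c : Int) (start_l : Int) (end_l : Int) : Bool × List (List Int) :=
  let segs := (PySem.List.slice data (some start_l) (some end_l)).map
    (fun row => PySem.List.slice row.toList (some start_c) (some end_c))
  let special := segs.any
    (fun s => (PySem.List.len s) ≠ (pvAllowed.map (fun d => ((PySem.Chars.count s [d] : Int)))).sum)
  let stars := (PySem.List.enumerate segs 0).flatMap
    (fun p => (pvStarsFrom p.2 0).map (fun i => [start_c + i, start_l + p.1]))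
  (special, stars)

-- ===== PRECONDITION & SPEC =====
def Spec_ControlElement (data : List String) (start_c : Int) (end_c : Int) (start_l : Int) (end_l : Int) (out : Bool × List (List Int)) : Prop := out = ControlElement_alt data start_c end_c start_l end_l
instance (data : List String) (start_c : Int) (end_c : Int) (start_l : Int) (end_l : Int) (out : Bool × List (List Int)) : Decidable (Spec_ControlElement data start_c end_c start_l end_l out) := by unfold Spec_ControlElement; infer_instance

-- ===== CLAIM (what is proved, stated in full; the proofs are below) =====
def Claim_equal_ControlElement : Prop := ∀ (data : List String) (start_c : Int) (end_c : Int) (start_l : Int) (end_l : Int), Dom_ControlElement data start_c end_c start_l end_l → Spec_ControlElement data start_c end_c start_l end_l (ControlElement data start_c end_c start_l end_l)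

-- ===== LEMMAS AND PROOFS =====

def pvSpecial (c : Char) : Bool := !(PySem.Chars.isdigit c) && c ≠ '.' && c ≠ '\n'

-- A's inner fold over one row's enumerated chars appends, to both accumulators, exactly
-- the per-row pieces.
theorem inner_fold_eq (sc y : Int) (l : List (Int × Char)) (acc : List String × List (List Int)) :
    l.foldl
      (fun (acc2 : List String × List (List Int)) q =>
        if !(PySem.Chars.isdigit q.2) && q.2 ≠ '.' && q.2 ≠ '\n' then
          ((acc2.1 ++ ["1"]),
           (if q.2 = '*' then acc2.2 ++ [[sc + q.1, y]] else acc2.2))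
        else acc2)
      acc
    = (acc.1 ++ (l.filter (fun q => pvSpecial q.2)).map (fun _ => "1"),
       acc.2 ++ l.filterMap (fun q => if q.2 = '*' then some [sc + q.1, y] else none)) := by
  induction l generalizing acc with
  | nil => simp
  | cons q t ih =>
    have hb : (!(PySem.Chars.isdigit q.2) && decide (q.2 ≠ '.') && decide (q.2 ≠ '\n')) = pvSpecial q.2 := rfl
    simp only [List.foldl_cons, List.filter_cons, List.filterMap_cons, hb]
    by_cases hs : pvSpecial q.2 = true
    · rw [if_pos hs, ih]
      by_cases hstar : q.2 = '*'
      · simp [hstar, show pvSpecial '*' = true from rfl]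
      · simp [hstar, hs]
    · have hstar : q.2 ≠ '*' := by
        intro h; exact hs (by simp [pvSpecial, h, PySem.Chars.isdigit])
      rw [if_neg hs, ih]
      simp [hs, hstar]

-- A pair fold whose step appends to each component separately is a pair of flatMaps.
theorem pair_fold_flatMap {α : Type} (F : α → List String) (G : α → List (List Int))
    (rows : List α) (acc : List String × List (List Int)) :
    rows.foldl (fun (acc : List String × List (List Int)) p => (acc.1 ++ F p, acc.2 ++ G p)) acc
      = (acc.1 ++ rows.flatMap F, acc.2 ++ rows.flatMap G) := by
  induction rows generalizing acc with
  | nil => simp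
  | cons p t ih => simp [ih, List.append_assoc]

-- any over the constant-"1" list built from a filter is any of the filter predicate.
theorem any_ones {α : Type} (p : α → Bool) (l : List α) :
    ((l.filter p).map (fun _ => "1")).any (fun s => s ≠ "") = l.any p := by
  cases h : l.any p <;> simp_all [List.any_eq_true, List.any_eq_false]

theorem any_snd_enumerate {α : Type} (p : α → Bool) (l : List α) (s : Int) :
    (PySem.List.enumerate l s).any (fun q => p q.2) = l.any p := by
  induction l generalizing s with
  | nil => rfl
  | cons x t ih => simp [PySem.List.enumerate_cons, ih]

-- str.count of a single character is the character count
theorem count_go_single (c : Char) (l : List Char) (fuel acc : Nat) (hf : l.length ≤ fuel) :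
    PySem.Chars.count.go [c] fuel l acc = acc + l.count c := by
  induction l generalizing fuel acc with
  | nil => cases fuel <;> rfl
  | cons h t ih =>
    cases fuel with
    | zero => simp at hf
    | succ f =>
      have hf' : t.length ≤ f := by simp at hf; omega
      simp only [PySem.Chars.count.go, List.isPrefixOf, List.count_cons]
      by_cases hc : c = h
      · subst hc
        simp only [beq_self_eq_true, Bool.true_and]
        rw [if_pos (by simp)]
        rw [show List.drop [c].length (c :: t) = t from rfl, ih f (acc + 1) hf']
        simp
        omega
      · have hb : ((c == h) : Bool) = false := by simp [hc]
        simp only [hb, Bool.false_and]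
        rw [if_neg (by simp)]
        rw [ih f acc hf']
        simp [Ne.symm hc]

theorem count_single (s : List Char) (c : Char) :
    PySem.Chars.count s [c] = s.count c := by
  have : PySem.Chars.count s [c] = PySem.Chars.count.go [c] s.length s 0 := by
    simp [PySem.Chars.count]
  rw [this, count_go_single c s s.length 0 le_rfl]
  omega

theorem ind_sum (c : Char) (ds : List Char) (hnd : ds.Nodup) :
    (ds.map (fun d => if c = d then (1:Nat) else 0)).sum = if c ∈ ds then 1 else 0 := by
  induction ds with
  | nil => simp
  | cons d ds ih =>
    rcases List.nodup_cons.mp hnd with ⟨hd, hnd'⟩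
    simp only [List.map_cons, List.sum_cons, ih hnd']
    by_cases hc : c = d
    · subst hc; simp [hd]
    · simp [hc]

-- summing per-class character counts over a duplicate-free class list counts membership
theorem sum_counts (ds : List Char) (hnd : ds.Nodup) (s : List Char) :
    (ds.map (fun d => s.count d)).sum = s.countP (fun c => decide (c ∈ ds)) := by
  induction s with
  | nil => simp
  | cons c t ih =>
    simp only [List.count_cons, List.countP_cons, beq_iff_eq]
    rw [List.sum_map_add, ih, ind_sum c ds hnd]
    by_cases hm : c ∈ ds <;> simp [hm]

-- the allowed classes are exactly the non-special characters
theorem mem_allowed_iff (c : Char) : c ∈ pvAllowed ↔ pvSpecial c = false := by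
  constructor
  · intro h
    rw [show pvAllowed = ['0','1','2','3','4','5','6','7','8','9','.','\n'] from rfl] at h
    fin_cases h <;> rfl
  · intro h
    simp only [pvSpecial, PySem.Chars.isdigit, Bool.and_eq_false_iff, Bool.not_eq_false',
      Bool.and_eq_true, decide_eq_true_eq, ne_eq] at h
    rcases h with (⟨h1, h2⟩ | h) | h
    · have hv1 : 48 ≤ c.toNat := by simpa [Char.le_def, UInt32.le_iff_toNat_le] using h1
      have hv2 : c.toNat ≤ 57 := by simpa [Char.le_def, UInt32.le_iff_toNat_le] using h2
      have hc := (Char.ofNat_toNat c).symm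
      interval_cases hcv : c.toNat <;> subst hc <;> decide
    · rw [decide_eq_false_iff_not, not_not] at h; subst h; decide
    · rw [decide_eq_false_iff_not, not_not] at h; subst h; decide

-- the counting test over one segment is A's any-special test
theorem seg_bool (s : List Char) :
    (decide (PySem.List.len s ≠ (pvAllowed.map (fun d => ((PySem.Chars.count s [d] : Int)))).sum))
      = s.any pvSpecial := by
  have h1 : (pvAllowed.map (fun d => ((PySem.Chars.count s [d] : Int)))).sum
      = ((pvAllowed.map (fun d => s.count d)).sum : Int) := by
    rw [show (pvAllowed.map (fun d => ((PySem.Chars.count s [d] : Int))))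
        = (pvAllowed.map (fun d => s.count d)).map (fun n : Nat => (n : Int)) by
      rw [List.map_map]; simp [count_single]]
    rw [← Nat.cast_list_sum]
  rw [h1, sum_counts _ (by decide) s]
  have h2 : (fun c => decide (c ∈ pvAllowed)) = fun c => !pvSpecial c := by
    funext c
    by_cases h : c ∈ pvAllowed
    · simp [h, (mem_allowed_iff c).mp h]
    · have ht : pvSpecial c = true := by
        cases hx : pvSpecial c
        · exact absurd ((mem_allowed_iff c).mpr hx) h
        · rfl
      simp [h, ht]
  rw [h2]
  have hlen : PySem.List.len s = (s.length : Int) := by simp [pysem]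
  have hsplit : s.countP (fun c => pvSpecial c) + s.countP (fun c => !pvSpecial c) = s.length := by
    simpa using (List.length_eq_countP_add_countP (p := fun c => pvSpecial c) (l := s)).symm
  by_cases h0 : s.countP (fun c => pvSpecial c) = 0
  · have hany : s.any pvSpecial = false := by
      rw [List.any_eq_false]
      intro a ha hpa
      have := List.countP_eq_zero.mp h0 a ha
      simp [hpa] at this
    rw [hany, hlen, decide_eq_false_iff_not, not_ne_iff]
    omega
  · have hany : s.any pvSpecial = true := by
      rw [List.any_eq_true]
      obtain ⟨a, ha, hpa⟩ := List.countP_pos_iff.mp (Nat.pos_of_ne_zero h0)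
      exact ⟨a, ha, hpa⟩
    rw [hany, hlen, decide_eq_true_eq]
    omega

-- singleton prefix and infix characterisations used for str.find reasoning
theorem singleton_prefix_iff (c : Char) (l : List Char) : [c] <+: l ↔ l.head? = some c := by
  cases l <;> simp [List.cons_prefix_cons, eq_comm]

theorem singleton_infix_iff (c : Char) (l : List Char) : [c] <:+: l ↔ c ∈ l := by
  constructor
  · rintro ⟨s, t, rfl⟩
    simp
  · intro h
    obtain ⟨s, t, rfl⟩ := List.append_of_mem h
    exact ⟨s, t, by simp⟩

-- the find-jump loop collects, in increasing order, exactly the indices ≥ k holding '*'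
theorem starsFrom_eq (cs : List Char) (k : Nat) :
    pvStarsFrom cs k
      = (PySem.List.pyRange (k : Int) (cs.length : Int)).filterMap
          (fun i => if cs[i.toNat]? = some '*' then some i else none) := by
  induction k using pvStarsFrom.induct cs with
  | case1 k j hj =>
    subst j
    rw [pvStarsFrom, dif_pos hj]
    by_cases hk : k ≤ cs.length
    · have hno : '*' ∉ List.drop k cs := by
        have := (PySem.Chars.findFrom_natCast_eq_neg_one_iff cs ['*'] k hk).mp hj
        rw [singleton_infix_iff] at this
        exact this
      symm
      rw [List.filterMap_eq_nil_iff]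
      intro i hi
      rw [PySem.List.mem_pyRange_one] at hi
      rw [if_neg]
      intro hstar
      apply hno
      have : (List.drop k cs)[i.toNat - k]? = some '*' := by
        rw [List.getElem?_drop, show k + (i.toNat - k) = i.toNat by omega, hstar]
      exact List.mem_of_getElem? this
    · rw [PySem.List.pyRange_one_eq_nil (by omega), List.filterMap_nil]
  | case2 k j hj ih =>
    subst j
    rw [pvStarsFrom, dif_neg hj]
    obtain ⟨hk_le, hlt⟩ := pvFind_bounds cs k hj
    have hk : k ≤ cs.length := by omega
    obtain ⟨h1, h2, h3⟩ := PySem.Chars.findFrom_natCast_spec cs ['*'] k hk hj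
    have hstar : cs[(PySem.Chars.findFrom cs ['*'] ((k : Nat) : Int) none).toNat]? = some '*' := by
      rw [← List.head?_drop]
      exact (singleton_prefix_iff '*' _).mp h2
    generalize hJ : PySem.Chars.findFrom cs ['*'] ((k : Nat) : Int) none = J at *
    have hJ0 : J = ((J.toNat : Nat) : Int) := by omega
    rw [PySem.List.pyRange_one_append ((k : Nat) : Int) ((J.toNat : Nat) : Int) ((cs.length : Nat) : Int)
      (by omega) (by omega)]
    rw [List.filterMap_append]
    have hfirst : (PySem.List.pyRange ((k : Nat) : Int) ((J.toNat : Nat) : Int)).filterMap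
        (fun i => if cs[i.toNat]? = some '*' then some i else none) = [] := by
      rw [List.filterMap_eq_nil_iff]
      intro i hi
      rw [PySem.List.mem_pyRange_one] at hi
      rw [if_neg]
      intro hst
      have hne := h3 i.toNat (by omega) (by omega)
      rw [singleton_prefix_iff, List.head?_drop] at hne
      exact hne hst
    rw [hfirst, List.nil_append]
    rw [PySem.List.pyRange_one_cons (by omega)]
    rw [List.filterMap_cons]
    simp only [Int.toNat_natCast, hstar, if_pos]
    rw [hJ0]
    simp only [Int.toNat_natCast]
    rw [ih, show ((J.toNat + 1 : Nat) : Int) = ((J.toNat : Nat) : Int) + 1 by omega]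

theorem enumerate_map {a b : Type} (f : a → b) (xs : List a) (s : Int) :
    PySem.List.enumerate (xs.map f) s = (PySem.List.enumerate xs s).map (fun p => (p.1, f p.2)) := by
  induction xs generalizing s with
  | nil => rfl
  | cons x t ih => simp [PySem.List.enumerate_cons, ih]

-- one row's find-jump star list is A's per-row filterMap over the enumerated characters
theorem row_stars (seg : List Char) (sc y : Int) :
    (pvStarsFrom seg 0).map (fun i => [sc + i, y])
      = (PySem.List.enumerate seg 0).filterMap
          (fun q => if q.2 = '*' then some [sc + q.1, y] else none) := by
  rw [show pvStarsFrom seg 0 = _ from starsFrom_eq seg 0]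
  rw [PySem.List.enumerate_eq_map_pyRange seg 'x', List.filterMap_map, List.map_filterMap]
  rw [show PySem.List.len seg = (seg.length : Int) by simp [pysem]]
  apply List.filterMap_congr
  intro j hj
  rw [PySem.List.mem_pyRange_one] at hj
  have hlt : j.toNat < seg.length := by omega
  simp only [Function.comp]
  rw [PySem.List.pyGetD_eq_getElem seg 'x' (by omega) (by omega)]
  rw [show seg[j.toNat]? = some seg[j.toNat] from List.getElem?_eq_getElem hlt]
  by_cases hs : seg[j.toNat] = '*'
  · simp [hs]
  · simp [hs]


-- ===== VERDICT (by name: the statement is the Claim_ definition above) =====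
theorem ControlElement_spec : Claim_equal_ControlElement := by
  intro data start_c end_c start_l end_l _
  unfold Spec_ControlElement ControlElement ControlElement_alt
  have hstep :
      (fun (acc : List String × List (List Int)) (p : Int × String) =>
        (PySem.List.enumerate (PySem.List.slice p.2.toList (some start_c) (some end_c)) 0).foldl
          (fun (acc2 : List String × List (List Int)) q =>
            if !(PySem.Chars.isdigit q.2) && q.2 ≠ '.' && q.2 ≠ '\n' then
              ((acc2.1 ++ ["1"]),
               (if q.2 = '*' then acc2.2 ++ [[start_c + q.1, start_l + p.1]] else acc2.2))
            else acc2)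
          acc)
      = (fun (acc : List String × List (List Int)) (p : Int × String) =>
          (acc.1 ++ ((PySem.List.enumerate (PySem.List.slice p.2.toList (some start_c) (some end_c)) 0).filter
                      (fun q => pvSpecial q.2)).map (fun _ => "1"),
           acc.2 ++ (PySem.List.enumerate (PySem.List.slice p.2.toList (some start_c) (some end_c)) 0).filterMap
                      (fun q => if q.2 = '*' then some [start_c + q.1, start_l + p.1] else none))) := by
    funext acc p
    exact inner_fold_eq start_c (start_l + p.1) _ acc
  simp only [hstep]
  rw [pair_fold_flatMap
    (fun p : Int × String =>
      ((PySem.List.enumerate (PySem.List.slice p.2.toList (some start_c) (some end_c)) 0).filter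
        (fun q => pvSpecial q.2)).map (fun _ => "1"))
    (fun p : Int × String =>
      (PySem.List.enumerate (PySem.List.slice p.2.toList (some start_c) (some end_c)) 0).filterMap
        (fun q => if q.2 = '*' then some [start_c + q.1, start_l + p.1] else none))]
  refine Prod.ext ?_ ?_
  · have h1 : ∀ p : Int × String,
        (((PySem.List.enumerate (PySem.List.slice p.2.toList (some start_c) (some end_c)) 0).filter
            (fun q => pvSpecial q.2)).map (fun _ => "1")).any (fun s => s ≠ "")
          = (PySem.List.slice p.2.toList (some start_c) (some end_c)).any pvSpecial := by
      intro p
      rw [any_ones, any_snd_enumerate]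
    simp only [List.nil_append, List.any_flatMap, h1]
    rw [any_snd_enumerate
      (fun row : String => (PySem.List.slice row.toList (some start_c) (some end_c)).any pvSpecial)]
    rw [List.any_map]
    congr 1
    funext row
    exact (seg_bool (PySem.List.slice row.toList (some start_c) (some end_c))).symm
  · simp only [List.nil_append]
    rw [enumerate_map, List.flatMap_map]
    congr 1
    funext p
    exact (row_stars (PySem.List.slice p.2.toList (some start_c) (some end_c)) start_c (start_l + p.1)).symm
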